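-- pv_equiv track=rewrite | github.com/dhbw-ma-ppp/ppp-2025 | Exercises/BjoernHeinen01/exercise_2_without_explanations.py | virtual_machine
-- ===== SOURCE A (Python) =====
-- def virtual_machine(data:list[int]) -> int:
--     """
--     The virtual machine takes a list of instruction and data
--     and performs operation on it like it is described in the task.
--
--     If the instruction value "data[func_ptr]" is "1"
--     the machine will add v1 and v2
--     and if the instruction value is "2"
--     the machine will multiply v1 and v2.
--
--     This happens via a function lookup in the function field.
--     Therefore, the instruction value gets transfomed into an index
--     by subtracting 1.
--
--     This approach may be slower with a small set of operators but
--     it scales with a time complexity of O(1) very well with larger sets of operators.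
--     """
--     func_ptr:int = 0
--
--     function_field:list = [lambda a, b: a + b,
--                            lambda a, b: a * b]
--
--     try:
--         while (data[func_ptr] != 99):
--             v1:int = data[data[func_ptr+1]]
--             v2:int = data[data[func_ptr+2]]
--
--             func_index:int = data[func_ptr]-1
--             if func_index < 0: raise IndexError()
--
--             data[data[func_ptr + 3]] = function_field[func_index](v1, v2)
--
--             func_ptr += 4
--
--         return data[0]
--
--     except IndexError:
--         error_message_start:str = f"Error: A wrong function index was tried to use!\nData: n{data}\nfunction pointer: {func_ptr}\n"
--         try:
--             raise IndexError(error_message_start + f"function index: {data[func_ptr]-1}")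
--         except IndexError:
--             raise IndexError(error_message_start + f"In addition to this error, the index to the index of the function pointer is out of range!")
-- ===== SOURCE B (Python) =====
-- def virtual_machine(data: list[int]) -> int:
--     # Pure recursive interpreter over an immutable dict memory (address -> cell)
--     # built once from enumerate; each step yields a NEW memory instead of
--     # mutating the caller's list (A mutates `data` in place; equivalence is
--     # about the return value).
--     def run(mem: dict, ptr: int) -> int:
--         op = mem[ptr]
--         if op == 99:
--             return mem[0]
--         if op == 1:
--             res = mem[mem[ptr + 1]] + mem[mem[ptr + 2]]
--         elif op == 2:
--             res = mem[mem[ptr + 1]] * mem[mem[ptr + 2]]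
--         else:
--             raise ValueError(f"bad opcode {op} at address {ptr}")
--         return run({**mem, mem[ptr + 3]: res}, ptr + 4)
--
--     return run(dict(enumerate(data)), 0)
-- ===== Notes on version B (the rewrite author's own statement) =====
-- stated objective: alternative
-- what changed: A runs a mutating while loop over the input list with a lambda dispatch table indexed by opcode-1 and a try/except that reformats IndexError; B is a pure recursive interpreter over an immutable integer-keyed dict memory built once from enumerate, threading a fresh memory through each recursive step and never mutating the caller's list.
-- outside the precondition, e.g. on virtual_machine([1, -1, -1, 0, 99]): A returns 198, B raises KeyError; on virtual_machine([1, 0, 0, -5, 99]): A returns 2, B returns 1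
import Mathlib
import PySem

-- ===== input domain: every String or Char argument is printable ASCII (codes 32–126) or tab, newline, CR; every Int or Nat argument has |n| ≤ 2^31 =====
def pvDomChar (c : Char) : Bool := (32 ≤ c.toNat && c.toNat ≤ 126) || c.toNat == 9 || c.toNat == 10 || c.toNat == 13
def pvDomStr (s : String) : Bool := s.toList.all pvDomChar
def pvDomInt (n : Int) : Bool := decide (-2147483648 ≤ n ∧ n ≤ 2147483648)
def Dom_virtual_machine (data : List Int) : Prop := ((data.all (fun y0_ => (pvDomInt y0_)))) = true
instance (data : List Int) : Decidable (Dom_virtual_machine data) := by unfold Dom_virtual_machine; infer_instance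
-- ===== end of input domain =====

-- B replaces A's mutating while loop + lambda dispatch table by a pure recursive
-- interpreter over an immutable dict memory built once from enumerate; the
-- equivalence is about the RETURN value only (A mutates its list argument in
-- place, B does not).

-- ===== PORT A =====
-- A's function_field of lambdas
def vmFieldA : List (Int → Int → Int) := [fun a b => a + b, fun a b => a * b]

-- A's while loop; the fuel argument only bounds the recursion (inside Pre_ the
-- loop halts within ≤ len/4 + 1 iterations, since func_ptr starts at 0 and
-- grows by 4 while it must stay below len to read an opcode);
-- none = the IndexError paths of A.
def vmLoopA : Nat → List Int → Nat → Option Int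
  | 0, _, _ => none
  | fuel+1, data, p =>
    match PySem.List.pyGet? data (p : Int) with
    | none => none
    | some op =>
      if op = 99 then PySem.List.pyGet? data 0
      else
        match PySem.List.pyGet? data ((p : Int) + 1) with
        | none => none
        | some i1 =>
          match PySem.List.pyGet? data i1 with
          | none => none
          | some v1 =>
            match PySem.List.pyGet? data ((p : Int) + 2) with
            | none => none
            | some i2 =>
              match PySem.List.pyGet? data i2 with
              | none => none
              | some v2 =>
                let fi := op - 1
                if fi < 0 then none
                else
                  match PySem.List.pyGet? vmFieldA fi with
                  | none => none
                  | some f =>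
                    match PySem.List.pyGet? data ((p : Int) + 3) with
                    | none => none
                    | some t =>
                      match PySem.List.pySet? data t (f v1 v2) with
                      | none => none
                      | some data' => vmLoopA fuel data' (p + 4)

def virtual_machine (data : List Int) : Int :=
  (vmLoopA (data.length + 1) data 0).getD 0

-- ===== PORT B =====
-- B's recursive run over a dict memory; the fuel bounds the recursion exactly
-- as for A (same step count inside Pre_); none = the raising paths of B.
def vmRunB : Nat → PySem.Dict Int Int → Int → Option Int
  | 0, _, _ => none
  | fuel+1, mem, ptr =>
    (mem.get? ptr).bind fun op =>
      if op = 99 then mem.get? 0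
      else
        (if op = 1 then
          (mem.get? (ptr + 1)).bind fun i1 => (mem.get? i1).bind fun a =>
          (mem.get? (ptr + 2)).bind fun i2 => (mem.get? i2).bind fun b => some (a + b)
        else if op = 2 then
          (mem.get? (ptr + 1)).bind fun i1 => (mem.get? i1).bind fun a =>
          (mem.get? (ptr + 2)).bind fun i2 => (mem.get? i2).bind fun b => some (a * b)
        else none).bind fun res =>
        (mem.get? (ptr + 3)).bind fun dst =>
          vmRunB fuel (mem.insert dst res) (ptr + 4)

-- mem = dict(enumerate(data)), run(mem, 0)
def virtual_machine_alt (data : List Int) : Int :=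
  (vmRunB (data.length + 1) (PySem.Dict.ofList (PySem.List.enumerate data)) 0).getD 0

-- ===== PRECONDITION & SPEC =====
-- a nonnegative in-range list read (the only access pattern Pre_ admits)
def nnGet? (xs : List Int) (i : Int) : Option Int :=
  if 0 ≤ i then xs[i.toNat]? else none

-- Whether this VM halts normally depends on the program it executes (the code is
-- self-modifying), so no closed formula over `data` exists: Pre_ is necessarily
-- the trace condition "the machine reaches opcode 99 with every read and write
-- at a nonnegative in-range address". It is not either port: it computes no
-- return value and validates addresses both ports merely use.
def vmHalts : Nat → List Int → Nat → Bool
  | 0, _, _ => false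
  | fuel+1, data, p =>
    match nnGet? data (p : Int) with
    | none => false
    | some op =>
      if op = 99 then true
      else if op = 1 ∨ op = 2 then
        match nnGet? data ((p : Int) + 1), nnGet? data ((p : Int) + 2),
              nnGet? data ((p : Int) + 3) with
        | some i1, some i2, some dst =>
          match nnGet? data i1, nnGet? data i2 with
          | some a, some b =>
            if 0 ≤ dst ∧ dst < (data.length : Int) then
              vmHalts fuel (data.set dst.toNat (if op = 1 then a + b else a * b)) (p + 4)
            else false
          | _, _ => false
        | _, _, _ => false
      else false

-- Pre_ excludes the inputs on which A raises IndexError (an out-of-range access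
-- or an opcode outside {1,2,99}), and additionally the runs that use a NEGATIVE
-- address for an operand read or the destination write: negative addresses are
-- outside the instruction format, and there A's Python-list wraparound and B's
-- dict memory (no aliasing: KeyError on a negative read, a distinct cell on a
-- negative store) are both defensible and no one would specify either.
def Pre_virtual_machine (data : List Int) : Prop :=
  vmHalts (data.length + 1) data 0 = true
instance (data : List Int) : Decidable (Pre_virtual_machine data) := by
  unfold Pre_virtual_machine; infer_instance

def pvWitness_virtual_machine : List Int := [1, 5, 5, 0, 99, 1]

def Spec_virtual_machine (data : List Int) (out : Int) : Prop := out = virtual_machine_alt data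
instance (data : List Int) (out : Int) : Decidable (Spec_virtual_machine data out) := by unfold Spec_virtual_machine; infer_instance

-- ===== CLAIM (what is proved, stated in full; the proofs are below) =====
def Claim_equal_virtual_machine : Prop := ∀ (data : List Int), Dom_virtual_machine data → Pre_virtual_machine data → Spec_virtual_machine data (virtual_machine data)

-- ===== LEMMAS AND PROOFS =====

-- an in-range nonnegative read is read identically by Python's xs[i]
lemma nnGet?_pyGet? {xs : List Int} {i v : Int} (h : nnGet? xs i = some v) :
    PySem.List.pyGet? xs i = some v := by
  unfold nnGet? at h
  split at h
  next hi =>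
    obtain ⟨hlt, hv⟩ := List.getElem?_eq_some_iff.mp h
    simp [PySem.List.pyGet?, PySem.List.pyIdx?, hi,
      show i < (xs.length : Int) by omega, hv]
  next => exact absurd h (by simp)

-- an in-range nonnegative write is Python's xs[i] = v
lemma pySet?_nn {xs : List Int} {i : Int} (v : Int) (h0 : 0 ≤ i)
    (h1 : i < (xs.length : Int)) :
    PySem.List.pySet? xs i v = some (xs.set i.toNat v) := by
  simp [PySem.List.pySet?, PySem.List.pyIdx?, h0, h1]

-- looking up dict(enumerate(xs, s))
lemma get?_update_enumerate (xs : List Int) :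
    ∀ (d : PySem.Dict Int Int) (s i : Int),
    (d.update (PySem.List.enumerate xs s)).get? i =
      if s ≤ i ∧ i < s + xs.length then xs[(i - s).toNat]? else d.get? i := by
  induction xs with
  | nil =>
    intro d s i
    simp only [PySem.List.enumerate, PySem.Dict.update, List.foldl_nil]
    rw [if_neg (by simp only [List.length_nil, Nat.cast_zero]; omega)]
  | cons x xs ih =>
    intro d s i
    rw [PySem.List.enumerate_cons]
    have hstep : d.update ((s, x) :: PySem.List.enumerate xs (s + 1)) =
        (d.insert s x).update (PySem.List.enumerate xs (s + 1)) := rfl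
    rw [hstep, ih]
    by_cases hi : i = s
    · subst hi
      rw [if_neg (by omega), PySem.Dict.get?_insert, if_pos rfl,
        if_pos (by constructor <;> [omega; simp])]
      simp
    · rw [PySem.Dict.get?_insert, if_neg hi]
      by_cases hin : s + 1 ≤ i ∧ i < s + 1 + xs.length
      · rw [if_pos hin, if_pos (by simp; omega)]
        have : (i - s).toNat = (i - (s + 1)).toNat + 1 := by omega
        rw [this, List.getElem?_cons_succ]
      · rw [if_neg hin, if_neg (by simp; omega)]

-- the initial dict memory agrees with the list
lemma get?_ofList_enumerate (xs : List Int) (i : Int) :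
    (PySem.Dict.ofList (PySem.List.enumerate xs)).get? i = nnGet? xs i := by
  have h := get?_update_enumerate xs PySem.Dict.empty 0 i
  unfold PySem.Dict.ofList
  rw [h]
  unfold nnGet?
  by_cases h0 : 0 ≤ i
  · by_cases h1 : i < (xs.length : Int)
    · rw [if_pos ⟨h0, by omega⟩, if_pos h0]
      have : (i - 0).toNat = i.toNat := by omega
      rw [this]
    · rw [if_neg (by omega), if_pos h0, List.getElem?_eq_none (by omega)]
      simp [PySem.Dict.get?_empty]
  · rw [if_neg (by omega), if_neg h0]
    simp [PySem.Dict.get?_empty]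

-- one in-range store keeps the dict memory and the list in agreement
lemma insert_set_invariant {mem : PySem.Dict Int Int} {data : List Int}
    (hinv : ∀ j, mem.get? j = nnGet? data j) {dst : Int} (v : Int)
    (h0 : 0 ≤ dst) (h1 : dst < (data.length : Int)) :
    ∀ j, (mem.insert dst v).get? j = nnGet? (data.set dst.toNat v) j := by
  intro j
  rw [PySem.Dict.get?_insert]
  by_cases hj : j = dst
  · subst hj
    rw [if_pos rfl]
    unfold nnGet?
    rw [if_pos h0, List.getElem?_set_self (by omega)]
  · rw [if_neg hj, hinv j]
    unfold nnGet?
    by_cases hj0 : 0 ≤ j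
    · rw [if_pos hj0, if_pos hj0, List.getElem?_set_ne (by omega)]
    · rw [if_neg hj0, if_neg hj0]

-- the core agreement: along any validated trace the two interpreters coincide
lemma vm_agree : ∀ (fuel : Nat) (data : List Int) (mem : PySem.Dict Int Int) (p : Nat),
    vmHalts fuel data p = true → (∀ j, mem.get? j = nnGet? data j) →
    vmLoopA fuel data p = vmRunB fuel mem (p : Int) := by
  intro fuel
  induction fuel with
  | zero => intro data mem p h _; simp [vmHalts] at h
  | succ n ih =>
    intro data mem p h hinv
    simp only [vmHalts] at h
    simp only [vmLoopA, vmRunB]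
    split at h
    · simp at h
    next op hp =>
      have hlen : (p : Int).toNat < data.length := by
        have hp' := hp
        unfold nnGet? at hp'
        rw [if_pos (by omega)] at hp'
        exact (List.getElem?_eq_some_iff.mp hp').1
      rw [nnGet?_pyGet? hp, hinv (p : Int), hp]
      simp only [Option.bind_some]
      split at h
      next h99 =>
        rw [if_pos h99, if_pos h99]
        have hlen0 : 0 < data.length := by omega
        have h0 : nnGet? data 0 = data[(0 : Int).toNat]? := by
          unfold nnGet?; rw [if_pos (by omega)]
        rw [hinv 0, h0]
        have : PySem.List.pyGet? data 0 = data[(0 : Int).toNat]? := by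
          simp [PySem.List.pyGet?, PySem.List.pyIdx?, hlen0]
        rw [this]
      next h99 =>
        rw [if_neg h99, if_neg h99]
        split at h
        next hop =>
          split at h
          next i1 i2 dst h1 h2 h3 =>
            split at h
            next a b ha hb =>
              split at h
              next hrange =>
                obtain ⟨hd0, hd1⟩ := hrange
                rcases hop with h1' | h2'
                · subst h1'
                  have hrec := ih _ (mem.insert dst (a + b)) (p + 4)
                    (by simpa using h)
                    (insert_set_invariant hinv (a + b) hd0 hd1)
                  rw [show ((p + 4 : Nat) : Int) = (p : Int) + 4 by push_cast; ring] at hrec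
                  simp only [nnGet?_pyGet? h1, nnGet?_pyGet? ha, nnGet?_pyGet? h2,
                    nnGet?_pyGet? hb, nnGet?_pyGet? h3, hinv, h1, h2, h3, ha, hb,
                    Option.bind_some]
                  norm_num [vmFieldA, PySem.List.pyGet?, PySem.List.pyIdx?,
                    pySet?_nn (a + b) hd0 hd1]
                  exact hrec
                · subst h2'
                  have hrec := ih _ (mem.insert dst (a * b)) (p + 4)
                    (by simpa using h)
                    (insert_set_invariant hinv (a * b) hd0 hd1)
                  rw [show ((p + 4 : Nat) : Int) = (p : Int) + 4 by push_cast; ring] at hrec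
                  simp only [nnGet?_pyGet? h1, nnGet?_pyGet? ha, nnGet?_pyGet? h2,
                    nnGet?_pyGet? hb, nnGet?_pyGet? h3, hinv, h1, h2, h3, ha, hb,
                    Option.bind_some]
                  norm_num [vmFieldA, PySem.List.pyGet?, PySem.List.pyIdx?,
                    pySet?_nn (a * b) hd0 hd1]
                  exact hrec
              next => simp at h
            next => simp at h
          next => simp at h
        next => simp at h

-- ===== VERDICT (by name: the statement is the Claim_ definition above) =====
theorem virtual_machine_spec : Claim_equal_virtual_machine := by
  intro data _ hpre
  unfold Spec_virtual_machine virtual_machine virtual_machine_alt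
  have h := vm_agree (data.length + 1) data
    (PySem.Dict.ofList (PySem.List.enumerate data)) 0 hpre
    (fun j => get?_ofList_enumerate data j)
  rw [show ((0 : Nat) : Int) = 0 from rfl] at h
  rw [h]
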